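-- pv_equiv track=rewrite | github.com/ASSERT-KTH/C4B_APR | data_directory/2837_problem_id/105783_author_id/Accepted.py | happy
-- ===== SOURCE A (Python) =====
-- def happy(n):
--
--     numbers = [0] * 10
--
--     while n != 0:
--
--         mod = n % 10
--
--         numbers[mod] += 1
--
--         n //= 10
--
--     count = 0
--
--     for i in range(1, 10):
--
--         if numbers[i] > 0:
--
--             count += numbers[i]
--
--             if count > 1:
--
--                 return False
--
--                 break
--
--     return True
-- ===== SOURCE B (Python) =====
-- def happy(n):
--     if n == 0:
--         return True
--     while n % 10 == 0:
--         n //= 10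
--     return n < 10
-- ===== Notes on version B (the rewrite author's own statement) =====
-- stated objective: simpler
-- what changed: Instead of tallying every digit into a 10-slot count array and summing the nonzero-digit counts with an early exit, B strips trailing zero digits and checks the remainder is a single digit (n = d*10^k form check).
-- outside the precondition, e.g. on happy(-1): A does not finish within the time limit, B returns True
import Mathlib
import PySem

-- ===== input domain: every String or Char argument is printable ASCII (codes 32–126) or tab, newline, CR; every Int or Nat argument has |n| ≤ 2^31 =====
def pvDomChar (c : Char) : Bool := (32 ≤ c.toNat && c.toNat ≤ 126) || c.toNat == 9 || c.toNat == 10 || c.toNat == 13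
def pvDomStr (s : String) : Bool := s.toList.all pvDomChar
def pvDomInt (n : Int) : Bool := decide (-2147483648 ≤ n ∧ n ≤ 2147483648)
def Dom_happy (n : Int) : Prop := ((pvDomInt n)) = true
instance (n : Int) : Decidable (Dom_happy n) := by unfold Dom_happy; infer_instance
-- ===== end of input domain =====

-- B replaces A's 10-slot digit-count array and early-exit tally with a direct form check:
-- strip trailing zero digits, then test whether a single digit remains (objective: simpler).

-- ===== PORT A =====
-- 'while n != 0' digit-tally loop; fuel n.natAbs + 1 suffices for every n ≥ 0
-- (on n < 0 the Python loop never terminates; such n are outside Pre_happy).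
def happyDigitLoop : Nat → Int → List Int → List Int
  | 0, _, numbers => numbers
  | fuel + 1, n, numbers =>
    if n = 0 then numbers
    else
      let m := PySem.Int.mod n 10
      happyDigitLoop fuel (PySem.Int.floordiv n 10) (numbers.modify m.toNat (· + 1))

-- 'for i in range(1, 10)' with the early 'return False'
def happyCheckLoop (numbers : List Int) (count : Int) : List Int → Bool
  | [] => true
  | i :: rest =>
    let v := (PySem.List.pyGet? numbers i).getD 0   -- i ∈ [1,9] is always in range
    if v > 0 then
      let count := count + v
      if count > 1 then false else happyCheckLoop numbers count rest
    else happyCheckLoop numbers count rest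

def happy (n : Int) : Bool :=
  let numbers := List.replicate 10 (0 : Int)
  let numbers := happyDigitLoop (n.natAbs + 1) n numbers
  happyCheckLoop numbers 0 (PySem.List.pyRange 1 10 1)

-- ===== PORT B =====
-- 'while n % 10 == 0: n //= 10'; fuel n.natAbs suffices for every nonzero n ≥ 0.
def happyStripLoop : Nat → Int → Int
  | 0, n => n
  | fuel + 1, n =>
    if PySem.Int.mod n 10 = 0 then happyStripLoop fuel (PySem.Int.floordiv n 10) else n

def happy_alt (n : Int) : Bool :=
  if n = 0 then true
  else decide (happyStripLoop n.natAbs n < 10)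

-- ===== PRECONDITION & SPEC =====
-- Pre_ excludes n < 0: there A's while-loop never terminates (n settles at -1, since -1 // 10 = -1
-- and -1 % 10 = 9 in Python), so the Python A returns on exactly the nonnegative inputs.
def Pre_happy (n : Int) : Prop := 0 ≤ n
instance (n : Int) : Decidable (Pre_happy n) := by unfold Pre_happy; infer_instance
def pvWitness_happy : Int := 700

def Spec_happy (n : Int) (out : Bool) : Prop := out = happy_alt n
instance (n : Int) (out : Bool) : Decidable (Spec_happy n out) := by unfold Spec_happy; infer_instance

-- ===== CLAIM (what is proved, stated in full; the proofs are below) =====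
def Claim_equal_happy : Prop := ∀ (n : Int), Dom_happy n → Pre_happy n → Spec_happy n (happy n)

-- ===== LEMMAS AND PROOFS =====

-- the number of nonzero decimal digits of m (0 for m = 0)
def nzd : Nat → Nat
  | 0 => 0
  | m + 1 => (if (m + 1) % 10 ≠ 0 then 1 else 0) + nzd ((m + 1) / 10)

lemma nzd_succ (m : Nat) (h : 1 ≤ m) :
    nzd m = (if m % 10 ≠ 0 then 1 else 0) + nzd (m / 10) := by
  obtain ⟨k, rfl⟩ : ∃ k, m = k + 1 := ⟨m - 1, by omega⟩
  rw [nzd]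

lemma nzd_pos (m : Nat) (h : 1 ≤ m) : 1 ≤ nzd m := by
  induction m using Nat.strong_induction_on with
  | _ m ih =>
    rw [nzd_succ m h]
    by_cases hm : m % 10 ≠ 0
    · simp [hm]
    · have hrec := ih (m / 10) (by omega) (by omega)
      simp [hm]; omega

-- sum of entries 1..9 of the count array
def tailSum (l : List Int) : Int := (l.drop 1).sum

lemma sum_modify_add_one (l : List Int) (m : Nat) (h : m < l.length) :
    (l.modify m (· + 1)).sum = l.sum + 1 := by
  induction l generalizing m with
  | nil => simp at h
  | cons a t ih =>
    cases m with
    | zero => simp [List.modify]; ring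
    | succ k =>
      simp only [List.modify_succ_cons, List.sum_cons]
      rw [ih k (by simpa using h)]; ring

lemma tailSum_modify (l : List Int) (m : Nat) (h : m < l.length) :
    tailSum (l.modify m (· + 1)) = tailSum l + (if 1 ≤ m then 1 else 0) := by
  cases l with
  | nil => simp at h
  | cons a t =>
    cases m with
    | zero => simp [tailSum, List.modify]
    | succ k =>
      simp only [tailSum, List.modify_succ_cons, List.drop_one, List.tail_cons]
      rw [sum_modify_add_one t k (by simpa using h)]
      simp

lemma nonneg_modify (l : List Int) (m : Nat) (hl : ∀ x ∈ l, 0 ≤ x) :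
    ∀ x ∈ l.modify m (· + 1), 0 ≤ x := by
  induction l generalizing m with
  | nil => simp
  | cons a t ih =>
    cases m with
    | zero =>
      intro x hx
      rw [List.modify] at hx
      rcases List.mem_cons.mp hx with rfl | hx
      · have := hl a (by simp); show 0 ≤ a + 1; omega
      · exact hl x (by simp [hx])
    | succ k =>
      intro x hx
      rw [List.modify_succ_cons] at hx
      rcases List.mem_cons.mp hx with rfl | hx
      · exact hl x (by simp)
      · exact ih k (fun y hy => hl y (by simp [hy])) x hx

-- main invariant of A's digit loop
lemma digitLoop_char (fuel : Nat) : ∀ (n : Int) (numbers : List Int),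
    0 ≤ n → n.natAbs < fuel → numbers.length = 10 → (∀ x ∈ numbers, 0 ≤ x) →
    (happyDigitLoop fuel n numbers).length = 10 ∧
    (∀ x ∈ happyDigitLoop fuel n numbers, 0 ≤ x) ∧
    tailSum (happyDigitLoop fuel n numbers) = tailSum numbers + (nzd n.toNat : Int) := by
  induction fuel with
  | zero => intro n _ _ hf; omega
  | succ fuel ih =>
    intro n numbers hn hf hlen hpos
    by_cases h0 : n = 0
    · subst h0
      refine ⟨by simp [happyDigitLoop, hlen], by simpa [happyDigitLoop] using hpos,
        by simp [happyDigitLoop, nzd]⟩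
    · have hn1 : 1 ≤ n := by omega
      have hmlt : PySem.Int.mod n 10 < 10 := PySem.Int.mod_lt _ (by norm_num)
      have hmge : 0 ≤ PySem.Int.mod n 10 := PySem.Int.mod_nonneg _ (by norm_num)
      have hme : PySem.Int.mod n 10 = n % 10 := PySem.Int.mod_eq_emod_of_pos (by norm_num)
      have hfe : PySem.Int.floordiv n 10 = n / 10 := PySem.Int.floordiv_eq_ediv_of_pos (by norm_num)
      have hd0 : 0 ≤ n / 10 := by positivity
      have hdlt : (n / 10).natAbs < fuel := by
        have h1 : n / 10 < n := by omega
        omega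
      have hmidx : (PySem.Int.mod n 10).toNat < numbers.length := by rw [hlen]; omega
      simp only [happyDigitLoop, if_neg h0]
      obtain ⟨l1, l2, l3⟩ := ih (PySem.Int.floordiv n 10)
        (numbers.modify (PySem.Int.mod n 10).toNat (· + 1))
        (by rw [hfe]; exact hd0) (by rw [hfe]; exact hdlt)
        (by rw [List.length_modify]; exact hlen)
        (nonneg_modify _ _ hpos)
      refine ⟨l1, l2, ?_⟩
      rw [l3, tailSum_modify _ _ hmidx]
      have hnz : nzd n.toNat = (if n.toNat % 10 ≠ 0 then 1 else 0) + nzd (n.toNat / 10) :=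
        nzd_succ n.toNat (by omega)
      have htdiv : (PySem.Int.floordiv n 10).toNat = n.toNat / 10 := by rw [hfe]; omega
      have htmod : (PySem.Int.mod n 10).toNat = n.toNat % 10 := by rw [hme]; omega
      rw [htdiv, htmod, hnz]
      split_ifs <;> push_cast <;> omega

-- check loop characterization
lemma checkLoop_char (numbers : List Int) (hlen : numbers.length = 10)
    (hpos : ∀ x ∈ numbers, 0 ≤ x) :
    ∀ (idxs : List Int) (acc : Int), 0 ≤ acc → acc ≤ 1 →
    (∀ i ∈ idxs, 0 ≤ i ∧ i < 10) →
    happyCheckLoop numbers acc idxs =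
      decide (acc + (idxs.map (fun i => (PySem.List.pyGet? numbers i).getD 0)).sum ≤ 1) := by
  intro idxs
  induction idxs with
  | nil => intro acc h0 h1 _; simp [happyCheckLoop]; omega
  | cons i rest ih =>
    intro acc h0 h1 hidx
    have hiB := hidx i (by simp)
    have hget : ∀ j : Int, 0 ≤ j → j < 10 →
        0 ≤ (PySem.List.pyGet? numbers j).getD 0 := by
      intro j hj0 hj10
      have hjl : j.toNat < numbers.length := by omega
      have h : PySem.List.pyGet? numbers j = some (numbers[j.toNat]'hjl) := by
        simp [PySem.List.pyGet?, PySem.List.pyIdx?, hlen, hj0, hj10]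
      rw [h]
      exact hpos _ (by simp)
    have hv0 : 0 ≤ (PySem.List.pyGet? numbers i).getD 0 := hget i hiB.1 hiB.2
    have hrest : 0 ≤ (rest.map (fun j => (PySem.List.pyGet? numbers j).getD 0)).sum := by
      apply List.sum_nonneg
      intro x hx
      obtain ⟨j, hj, rfl⟩ := List.mem_map.mp hx
      exact hget j (hidx j (by simp [hj])).1 (hidx j (by simp [hj])).2
    simp only [happyCheckLoop, List.map_cons, List.sum_cons]
    split_ifs with hvpos hcnt
    · have : ¬ (acc + ((PySem.List.pyGet? numbers i).getD 0 +
          (rest.map (fun j => (PySem.List.pyGet? numbers j).getD 0)).sum) ≤ 1) := by omega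
      simp [this]
    · rw [ih (acc + (PySem.List.pyGet? numbers i).getD 0) (by omega) (by omega)
        (fun j hj => hidx j (by simp [hj]))]
      simp only [decide_eq_decide]
      omega
    · rw [ih acc h0 h1 (fun j hj => hidx j (by simp [hj]))]
      simp only [decide_eq_decide]
      omega

-- the index list range(1, 10)
lemma pyRange_1_10 : PySem.List.pyRange 1 10 1 = [1,2,3,4,5,6,7,8,9] := by decide

-- for a 10-entry list, the indexed sum over [1..9] is the sum of the tail
lemma map_get_eq_tailSum (l : List Int) (hl : l.length = 10) :
    (([1,2,3,4,5,6,7,8,9] : List Int).map (fun i => (PySem.List.pyGet? l i).getD 0)).sum = tailSum l := by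
  rcases l with _ | ⟨a0, l⟩
  · simp at hl
  rcases l with _ | ⟨a1, l⟩
  · simp at hl
  rcases l with _ | ⟨a2, l⟩
  · simp at hl
  rcases l with _ | ⟨a3, l⟩
  · simp at hl
  rcases l with _ | ⟨a4, l⟩
  · simp at hl
  rcases l with _ | ⟨a5, l⟩
  · simp at hl
  rcases l with _ | ⟨a6, l⟩
  · simp at hl
  rcases l with _ | ⟨a7, l⟩
  · simp at hl
  rcases l with _ | ⟨a8, l⟩
  · simp at hl
  rcases l with _ | ⟨a9, l⟩
  · simp at hl
  obtain rfl : l = [] := by simpa using hl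
  simp [PySem.List.pyGet?, PySem.List.pyIdx?, tailSum]

-- A computes: "the number of nonzero digits is ≤ 1"
lemma happy_char (n : Int) (hn : 0 ≤ n) : happy n = decide (nzd n.toNat ≤ 1) := by
  obtain ⟨hlen, hpos, hsum⟩ := digitLoop_char (n.natAbs + 1) n (List.replicate 10 0)
    hn (by omega) (by simp) (by simp)
  rw [happy]
  rw [checkLoop_char _ hlen hpos (PySem.List.pyRange 1 10 1) 0 le_rfl (by norm_num)
      (by rw [pyRange_1_10]; intro i hi; fin_cases hi <;> norm_num)]
  rw [pyRange_1_10, map_get_eq_tailSum _ hlen, hsum]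
  have : tailSum (List.replicate 10 (0 : Int)) = 0 := by simp [tailSum]
  rw [this]
  simp only [decide_eq_decide]
  omega

-- B's strip loop: a single nonzero digit remains iff n had at most one nonzero digit
lemma strip_char (fuel : Nat) : ∀ n : Int, 1 ≤ n → n ≤ (fuel : Int) →
    (happyStripLoop fuel n < 10 ↔ nzd n.toNat ≤ 1) := by
  induction fuel with
  | zero => intro n h1 h2; omega
  | succ fuel ih =>
    intro n h1 h2
    have hme : PySem.Int.mod n 10 = n % 10 := PySem.Int.mod_eq_emod_of_pos (by norm_num)
    have hfe : PySem.Int.floordiv n 10 = n / 10 := PySem.Int.floordiv_eq_ediv_of_pos (by norm_num)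
    have hnz : nzd n.toNat = (if n.toNat % 10 ≠ 0 then 1 else 0) + nzd (n.toNat / 10) :=
      nzd_succ n.toNat (by omega)
    rw [happyStripLoop]
    by_cases hm : PySem.Int.mod n 10 = 0
    · rw [if_pos hm]
      have hdvd : (10 : Int) ∣ n := (PySem.Int.mod_eq_zero_iff_dvd n 10).mp hm
      have h10 : 10 ≤ n := by omega
      have hd1 : 1 ≤ n / 10 := by omega
      have hdle : n / 10 ≤ (fuel : Int) := by omega
      rw [hfe, ih (n / 10) hd1 hdle]
      have hmz : n.toNat % 10 = 0 := by omega
      have hdt : (n / 10).toNat = n.toNat / 10 := by omega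
      rw [hdt, hnz]
      simp [hmz]
    · rw [if_neg hm]
      have hmz : n.toNat % 10 ≠ 0 := by rw [hme] at hm; omega
      by_cases hlt : n < 10
      · have : n.toNat / 10 = 0 := by omega
        rw [hnz, this]
        simp [hmz, nzd, hlt]
      · have hge : 10 ≤ n := by omega
        have hp : 1 ≤ nzd (n.toNat / 10) := nzd_pos _ (by omega)
        rw [hnz]
        simp [hmz]
        omega

lemma happy_alt_char (n : Int) (hn : 0 ≤ n) : happy_alt n = decide (nzd n.toNat ≤ 1) := by
  rw [happy_alt]
  by_cases h0 : n = 0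
  · subst h0; simp [nzd]
  · rw [if_neg h0]
    have h1 : 1 ≤ n := by omega
    have h2 : n ≤ (n.natAbs : Int) := by omega
    simp only [decide_eq_decide]
    exact strip_char n.natAbs n h1 h2

-- ===== VERDICT (by name: the statement is the Claim_ definition above) =====
theorem happy_spec : Claim_equal_happy := by
  intro n _ hpre
  unfold Spec_happy
  rw [happy_char n hpre, happy_alt_char n hpre]
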